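-- pv_equiv track=rewrite | github.com/StoDevX/AAO-React-Native | scripts/split-uitests.py | pack_shards
-- ===== SOURCE A (Python) =====
-- def pack_shards(
--     classes: list[tuple[str, int]], num_shards: int
-- ) -> list[list[tuple[str, int]]]:
--     """Distribute classes across shards using greedy bin-packing.
--
--     Assigns each class (largest first) to the shard with the lowest current
--     total test count. This is the classic LPT (Longest Processing Time)
--     multiprocessor scheduling heuristic.
--     """
--     shards: list[list[tuple[str, int]]] = [[] for _ in range(num_shards)]
--     totals = [0] * num_shards
--
--     for class_name, test_count in classes:
--         lightest = min(range(num_shards), key=lambda i: totals[i])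
--         shards[lightest].append((class_name, test_count))
--         totals[lightest] += test_count
--
--     return shards
-- ===== SOURCE B (Python) =====
-- def pack_shards(classes, num_shards):
--     """Same greedy assignment, but the shards are kept as a priority queue:
--     a list of (total, index, items) sorted by (total, index).  Each class pops
--     the lightest shard off the front and re-inserts it at the position found by
--     a binary search, so the per-class argmin scan over all totals disappears."""
--     queue = [(0, i, []) for i in range(num_shards)]
--     for class_name, test_count in classes:
--         total, idx, items = queue.pop(0)
--         items.append((class_name, test_count))
--         entry = (total + test_count, idx, items)
--         key = (entry[0], entry[1])
--         lo, hi = 0, len(queue)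
--         while lo < hi:
--             mid = (lo + hi) // 2
--             if (queue[mid][0], queue[mid][1]) < key:
--                 lo = mid + 1
--             else:
--                 hi = mid
--         queue.insert(lo, entry)
--     return [items for _, _, items in sorted(queue, key=lambda e: e[1])]
-- ===== Notes on version B (the rewrite author's own statement) =====
-- stated objective: faster
-- what changed: A rescans all shard totals with min(range(num_shards)) for every class; B keeps the shards as a priority queue - a list of (total, index, items) kept sorted by (total, index) - popping the lightest entry off the front and re-inserting it at a position found by hand-written binary search, then reads the result back by sorting on index.
-- outside the precondition, e.g. on pack_shards([('a', 1)], 0): A raises ValueError, B raises IndexError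
import Mathlib
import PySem

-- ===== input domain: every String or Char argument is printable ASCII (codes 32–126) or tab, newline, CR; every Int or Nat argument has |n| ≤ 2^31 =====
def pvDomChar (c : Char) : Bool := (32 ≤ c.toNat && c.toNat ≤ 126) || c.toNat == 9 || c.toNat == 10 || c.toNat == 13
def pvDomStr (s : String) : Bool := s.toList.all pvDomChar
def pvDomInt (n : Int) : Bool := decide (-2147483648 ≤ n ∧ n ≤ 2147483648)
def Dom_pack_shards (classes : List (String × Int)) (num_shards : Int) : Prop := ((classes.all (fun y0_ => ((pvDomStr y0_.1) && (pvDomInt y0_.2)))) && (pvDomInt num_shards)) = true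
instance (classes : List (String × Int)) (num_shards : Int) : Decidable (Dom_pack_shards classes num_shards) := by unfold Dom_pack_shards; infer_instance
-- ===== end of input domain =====

-- B replaces A's per-class argmin scan over the shard totals by a priority queue:
-- a list kept sorted by (total, index) with binary-search insertion; same greedy result.


-- ===== PORT A =====
-- main loop of A: for each class, pick the first index with minimal total
-- (Python's min(range(num_shards), key=...)), append the class there, bump the total
def packGoA (num_shards : Int) : List (String × Int) → List (List (String × Int)) → List Int → List (List (String × Int))
  | [], shards, _ => shards
  | (class_name, test_count) :: rest, shards, totals =>
    match PySem.List.min? (PySem.List.pyRange 0 num_shards 1) (fun i => PySem.List.pyGetD totals i 0) with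
    | none => shards  -- Python: min() of an empty range raises ValueError; excluded by Pre_
    | some lightest =>
        packGoA num_shards rest
          (PySem.List.pySetD shards lightest ((PySem.List.pyGetD shards lightest []) ++ [(class_name, test_count)]))
          (PySem.List.pySetD totals lightest ((PySem.List.pyGetD totals lightest 0) + test_count))

def pack_shards (classes : List (String × Int)) (num_shards : Int) : List (List (String × Int)) :=
  packGoA num_shards classes
    ((PySem.List.pyRange 0 num_shards 1).map (fun _ => []))      -- [[] for _ in range(num_shards)]
    (List.replicate num_shards.toNat 0)                           -- [0] * num_shards

-- ===== PORT B =====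
-- Python tuple comparison (queue[mid][0], queue[mid][1]) < key on int pairs
def lexLtB (a b : Int × Int) : Bool := a.1 < b.1 || (a.1 == b.1 && a.2 < b.2)

def qkey (e : Int × Int × List (String × Int)) : Int × Int := (e.1, e.2.1)

-- Source B's while-loop binary search for the insertion position in the sorted queue
-- (fuel makes the loop structural; q.length iterations always suffice since hi - lo shrinks)
def bsearchQ (q : List (Int × Int × List (String × Int))) (k : Int × Int) : Nat → Int → Int → Int
  | 0, lo, _ => lo
  | fuel + 1, lo, hi =>
    if lo < hi then
      let mid := PySem.Int.floordiv (lo + hi) 2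
      if lexLtB (qkey (PySem.List.pyGetD q mid (0, 0, []))) k then
        bsearchQ q k fuel (mid + 1) hi
      else
        bsearchQ q k fuel lo mid
    else lo

-- Source B's main loop: pop the front (lightest) entry, extend it, re-insert at the searched position
def packGoB : List (String × Int) → List (Int × Int × List (String × Int)) → List (Int × Int × List (String × Int))
  | [], q => q
  | (class_name, test_count) :: rest, q =>
    match q with
    | [] => []  -- Python: queue.pop(0) raises IndexError; excluded by Pre_
    | e :: qrest =>
        let entry := (e.1 + test_count, e.2.1, e.2.2 ++ [(class_name, test_count)])
        packGoB rest (PySem.List.insert qrest (bsearchQ qrest (entry.1, entry.2.1) qrest.length 0 (qrest.length : Int)) entry)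

def pack_shards_alt (classes : List (String × Int)) (num_shards : Int) : List (List (String × Int)) :=
  let q0 := (PySem.List.pyRange 0 num_shards 1).map (fun i => ((0 : Int), i, ([] : List (String × Int))))
  (PySem.List.sorted (packGoB classes q0) (fun e => e.2.1) false).map (fun e => e.2.2)

-- ===== PRECONDITION & SPEC =====
-- Pre_ excludes only the inputs where A raises: a nonempty class list with
-- num_shards ≤ 0 makes A's min() raise ValueError on the empty range (B's queue[0] raises IndexError there too).
def Pre_pack_shards (classes : List (String × Int)) (num_shards : Int) : Prop :=
  classes = [] ∨ 1 ≤ num_shards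
instance (classes : List (String × Int)) (num_shards : Int) : Decidable (Pre_pack_shards classes num_shards) := by unfold Pre_pack_shards; infer_instance

def pvWitness_pack_shards : (List (String × Int)) × Int := ([("a", 3), ("b", 1), ("c", 2)], 2)

def Spec_pack_shards (classes : List (String × Int)) (num_shards : Int) (out : List (List (String × Int))) : Prop := out = pack_shards_alt classes num_shards
instance (classes : List (String × Int)) (num_shards : Int) (out : List (List (String × Int))) : Decidable (Spec_pack_shards classes num_shards out) := by unfold Spec_pack_shards; infer_instance

-- ===== CLAIM (what is proved, stated in full; the proofs are below) =====
def Claim_equal_pack_shards : Prop := ∀ (classes : List (String × Int)) (num_shards : Int), Dom_pack_shards classes num_shards → Pre_pack_shards classes num_shards → Spec_pack_shards classes num_shards (pack_shards classes num_shards)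

-- ===== LEMMAS AND PROOFS =====

-- proof-side reference implementation of the ordered insert B performs
def insortQ (entry : Int × Int × List (String × Int)) : List (Int × Int × List (String × Int)) → List (Int × Int × List (String × Int))
  | [] => [entry]
  | e :: rest => if lexLtB (qkey entry) (qkey e) then entry :: e :: rest else e :: insortQ entry rest


-- the queue entries that A's (shards, totals) state denotes
def Pof (totals : List Int) (shards : List (List (String × Int))) : List (Int × Int × List (String × Int)) :=
  (List.range totals.length).map (fun i => (totals.getD i 0, (i : Int), shards.getD i []))

-- invariant tying A's state to B's queue
def InvQ (n : Int) (shards : List (List (String × Int))) (totals : List Int) (q : List (Int × Int × List (String × Int))) : Prop :=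
  totals.length = n.toNat ∧ shards.length = n.toNat ∧
  q.Perm (Pof totals shards) ∧
  q.Pairwise (fun a b => lexLtB (qkey a) (qkey b) = true)

theorem map_range_getD_self {α : Type} (xs : List α) (d : α) :
    (List.range xs.length).map (fun i => xs.getD i d) = xs := by
  apply List.ext_getElem
  · simp
  · intro i h1 h2
    simp only [List.getElem_map, List.getElem_range]
    exact List.getD_eq_getElem xs d h2

-- result of the running-min fold: it is the FIRST minimum of a :: xs
theorem foldl_min_first {α : Type} (key : α → Int) :
    ∀ (xs : List α) (a : α),
      (xs.foldl (fun acc x => if key x < key acc then x else acc) a = a ∧ ∀ y ∈ xs, key a ≤ key y) ∨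
      (∃ l₁ m l₂, xs = l₁ ++ m :: l₂ ∧ xs.foldl (fun acc x => if key x < key acc then x else acc) a = m ∧
        (∀ y ∈ l₁, key m < key y) ∧ key m < key a ∧ ∀ y ∈ l₂, key m ≤ key y) := by
  intro xs
  induction xs with
  | nil => intro a; left; simp
  | cons x xs ih =>
      intro a
      by_cases hx : key x < key a
      · simp only [List.foldl_cons, if_pos hx]
        rcases ih x with ⟨heq, hall⟩ | ⟨l₁, m, l₂, hsplit, heq, hbef, hlt, haft⟩
        · right
          exact ⟨[], x, xs, by simp, heq, by simp, hx, hall⟩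
        · right
          refine ⟨x :: l₁, m, l₂, by simp [hsplit], heq, ?_, lt_trans hlt hx, haft⟩
          intro y hy
          rcases List.mem_cons.mp hy with rfl | hy
          · exact hlt
          · exact hbef y hy
      · simp only [List.foldl_cons, if_neg hx]
        push Not at hx
        rcases ih a with ⟨heq, hall⟩ | ⟨l₁, m, l₂, hsplit, heq, hbef, hlt, haft⟩
        · left
          refine ⟨heq, ?_⟩
          intro y hy
          rcases List.mem_cons.mp hy with rfl | hy
          · exact hx
          · exact hall y hy
        · right
          refine ⟨x :: l₁, m, l₂, by simp [hsplit], heq, ?_, hlt, haft⟩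
          intro y hy
          rcases List.mem_cons.mp hy with rfl | hy
          · exact lt_of_lt_of_le hlt hx
          · exact hbef y hy

theorem min?_cons_eq {α : Type} (key : α → Int) :
    ∀ (xs : List α) (x : α),
      PySem.List.min? (x :: xs) key = some (xs.foldl (fun acc y => if key y < key acc then y else acc) x) := by
  intro xs
  induction xs with
  | nil => intro x; rfl
  | cons z zs ih =>
      intro x
      by_cases hz : key z < key x
      · have h1 : PySem.List.min? (x :: z :: zs) key = PySem.List.min? (z :: zs) key := by
          simp [PySem.List.min?, hz]
        rw [h1, ih z]
        simp [hz]
      · have h1 : PySem.List.min? (x :: z :: zs) key = PySem.List.min? (x :: zs) key := by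
          simp [PySem.List.min?, hz]
        rw [h1, ih x]
        simp [hz]

-- Python min picks the FIRST element achieving the minimal key
theorem min?_first {α : Type} (xs : List α) (key : α → Int) (m : α)
    (h : PySem.List.min? xs key = some m) :
    ∃ l₁ l₂, xs = l₁ ++ m :: l₂ ∧ (∀ y ∈ l₁, key m < key y) ∧ (∀ y ∈ l₂, key m ≤ key y) := by
  match xs with
  | [] => simp [PySem.List.min?] at h
  | x :: xs =>
    have hfold : xs.foldl (fun acc y => if key y < key acc then y else acc) x = m := by
      have h2 := min?_cons_eq key xs x
      rw [h] at h2
      exact (Option.some.injEq _ _ ▸ h2.symm : _)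
    rcases foldl_min_first key xs x with ⟨heq, hall⟩ | ⟨l₁, m', l₂, hsplit, heq, hbef, hlt, haft⟩
    · refine ⟨[], xs, ?_, by simp, ?_⟩
      · simp [← hfold, heq]
      · intro y hy; rw [← hfold, heq]; exact hall y hy
    · have hm : m' = m := by rw [← hfold, heq]
      subst hm
      refine ⟨x :: l₁, l₂, by simp [hsplit], ?_, haft⟩
      intro y hy
      rcases List.mem_cons.mp hy with rfl | hy
      · exact hlt
      · exact hbef y hy

theorem insortQ_perm (e : Int × Int × List (String × Int)) :
    ∀ q : List (Int × Int × List (String × Int)), (insortQ e q).Perm (e :: q) := by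
  intro q
  induction q with
  | nil => simp [insortQ]
  | cons x xs ih =>
      simp only [insortQ]
      split
      · exact List.Perm.refl _
      · exact ((ih.cons x).trans (List.Perm.swap e x xs)).symm.symm

theorem mem_insortQ (e x : Int × Int × List (String × Int)) :
    ∀ q, x ∈ insortQ e q → x = e ∨ x ∈ q := by
  intro q
  induction q with
  | nil => simp [insortQ]
  | cons z zs ih =>
      simp only [insortQ]
      split
      · intro h; rcases List.mem_cons.mp h with rfl | h
        · exact Or.inl rfl
        · exact Or.inr h
      · intro h; rcases List.mem_cons.mp h with rfl | h
        · exact Or.inr (List.mem_cons_self)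
        · rcases ih h with h | h
          · exact Or.inl h
          · exact Or.inr (List.mem_cons_of_mem _ h)

theorem insortQ_pairwise (e : Int × Int × List (String × Int)) :
    ∀ q : List (Int × Int × List (String × Int)),
      q.Pairwise (fun a b => lexLtB (qkey a) (qkey b) = true) →
      (∀ f ∈ q, (qkey f).2 ≠ (qkey e).2) →
      (insortQ e q).Pairwise (fun a b => lexLtB (qkey a) (qkey b) = true) := by
  intro q
  induction q with
  | nil => intro _ _; simp [insortQ]
  | cons z zs ih =>
      intro hp hne
      rcases List.pairwise_cons.mp hp with ⟨hz, hzs⟩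
      simp only [insortQ]
      by_cases hlt : lexLtB (qkey e) (qkey z) = true
      · rw [if_pos hlt]
        refine List.pairwise_cons.mpr ⟨?_, hp⟩
        intro f hf
        rcases List.mem_cons.mp hf with rfl | hf
        · exact hlt
        · have h2 := hz f hf
          simp only [lexLtB, Bool.or_eq_true, Bool.and_eq_true, decide_eq_true_eq, beq_iff_eq] at *
          omega
      · rw [if_neg hlt]
        refine List.pairwise_cons.mpr ⟨?_, ih hzs (fun f hf => hne f (List.mem_cons_of_mem _ hf))⟩
        intro f hf
        rcases mem_insortQ e f zs hf with rfl | hf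
        · have hne' := hne z List.mem_cons_self
          simp only [lexLtB, Bool.or_eq_true, Bool.and_eq_true, decide_eq_true_eq, beq_iff_eq] at *
          omega
        · exact hz f hf


theorem lexLtB_asym_of {a b : Int × Int} (h : lexLtB a b = true) : lexLtB b a = false := by
  simp [lexLtB] at *; omega

theorem lexLtB_total_of {a b : Int × Int} (h : lexLtB a b = false) (hne : a.2 ≠ b.2) :
    lexLtB b a = true := by
  simp [lexLtB] at *; omega

theorem lexLtB_trans {a b c : Int × Int} (h1 : lexLtB a b = true) (h2 : lexLtB b c = true) :
    lexLtB a c = true := by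
  simp [lexLtB] at *; omega

-- PySem.List.insert at an in-range position is take/drop insertion
theorem pyinsert_take_drop {α : Type} (xs : List α) (i : Int) (v : α)
    (h0 : 0 ≤ i) (h1 : i ≤ (xs.length : Int)) :
    PySem.List.insert xs i v = xs.take i.toNat ++ v :: xs.drop i.toNat := by
  simp [PySem.List.insert, PySem.List.sliceIndices, min_eq_left h1,
    if_neg (show ¬ i < 0 by omega)]

-- the binary search returns the boundary of the sorted queue's prefix that is below k
theorem bsearchQ_spec (q : List (Int × Int × List (String × Int))) (k : Int × Int)
    (hpw : q.Pairwise (fun a b => lexLtB (qkey a) (qkey b) = true)) :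
    ∀ (fuel : Nat) (lo hi : Int), (hi - lo).toNat ≤ fuel → 0 ≤ lo → lo ≤ hi → hi ≤ (q.length : Int) →
    (∀ (i : Nat) (h : i < q.length), (i : Int) < lo → lexLtB (qkey q[i]) k = true) →
    (∀ (i : Nat) (h : i < q.length), hi ≤ (i : Int) → lexLtB (qkey q[i]) k = false) →
    ∃ p : Nat, bsearchQ q k fuel lo hi = (p : Int) ∧ p ≤ q.length ∧
      (∀ (i : Nat) (h : i < q.length), i < p → lexLtB (qkey q[i]) k = true) ∧
      (∀ (i : Nat) (h : i < q.length), p ≤ i → lexLtB (qkey q[i]) k = false) := by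
  intro fuel
  induction fuel with
  | zero =>
      intro lo hi hn h0 hlohi hhi hpre1 hpre2
      have hle : hi ≤ lo := by omega
      refine ⟨lo.toNat, by simp [bsearchQ]; omega, by omega, ?_, ?_⟩
      · intro i h hi2
        exact hpre1 i h (by omega)
      · intro i h hi2
        exact hpre2 i h (by omega)
  | succ fuel ih =>
      intro lo hi hn h0 hlohi hhi hpre1 hpre2
      by_cases hlt : lo < hi
      · have hm1 : lo ≤ PySem.Int.floordiv (lo + hi) 2 :=
          (PySem.Int.le_floordiv_iff_mul_le (by omega)).mpr (by omega)
        have hm2 : PySem.Int.floordiv (lo + hi) 2 < hi :=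
          (PySem.Int.floordiv_lt_iff_lt_mul (by omega)).mpr (by omega)
        have hmlen : (PySem.Int.floordiv (lo + hi) 2).toNat < q.length := by omega
        have hget : PySem.List.pyGetD q (PySem.Int.floordiv (lo + hi) 2) (0, 0, []) =
            q[(PySem.Int.floordiv (lo + hi) 2).toNat]'hmlen :=
          PySem.List.pyGetD_eq_getElem _ _ (by omega) (by omega)
        by_cases hc : lexLtB (qkey (PySem.List.pyGetD q (PySem.Int.floordiv (lo + hi) 2) (0, 0, []))) k = true
        · have hstep : bsearchQ q k (fuel + 1) lo hi = bsearchQ q k fuel (PySem.Int.floordiv (lo + hi) 2 + 1) hi := by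
            simp only [bsearchQ]
            rw [if_pos hlt, if_pos hc]
          rw [hstep]
          rw [hget] at hc
          refine ih _ hi (by omega) (by omega) (by omega) hhi ?_ hpre2
          intro i h hi2
          rcases Nat.lt_or_ge i (PySem.Int.floordiv (lo + hi) 2).toNat with hlt2 | hge
          · exact lexLtB_trans ((List.pairwise_iff_getElem.mp hpw) i _ h hmlen hlt2) hc
          · have : i = (PySem.Int.floordiv (lo + hi) 2).toNat := by omega
            subst this
            exact hc
        · have hstep : bsearchQ q k (fuel + 1) lo hi = bsearchQ q k fuel lo (PySem.Int.floordiv (lo + hi) 2) := by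
            simp only [bsearchQ]
            rw [if_pos hlt, if_neg hc]
          rw [hstep]
          rw [hget] at hc
          refine ih lo _ (by omega) h0 (by omega) (by omega) hpre1 ?_
          intro i h hi2
          rcases Nat.lt_or_ge i (PySem.Int.floordiv (lo + hi) 2).toNat with hlt2 | hge
          · omega
          · rcases Nat.lt_or_ge i (PySem.Int.floordiv (lo + hi) 2).toNat.succ with hlt3 | hge3
            · have : i = (PySem.Int.floordiv (lo + hi) 2).toNat := by omega
              subst this
              exact Bool.not_eq_true _ ▸ hc
            · by_cases hik : lexLtB (qkey q[i]) k = true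
              · exact absurd (lexLtB_trans ((List.pairwise_iff_getElem.mp hpw) _ i hmlen h (by omega)) hik)
                  (Bool.not_eq_true _ ▸ hc)
              · simpa using hik
      · have hstep : bsearchQ q k (fuel + 1) lo hi = lo := by
          simp only [bsearchQ]
          rw [if_neg hlt]
        refine ⟨lo.toNat, by rw [hstep]; omega, by omega, ?_, ?_⟩
        · intro i h hi2
          exact hpre1 i h (by omega)
        · intro i h hi2
          exact hpre2 i h (by omega)

-- the linear ordered insert lands at exactly that boundary
theorem insortQ_eq_take_drop (entry : Int × Int × List (String × Int)) :
    ∀ (q : List (Int × Int × List (String × Int))) (p : Nat), p ≤ q.length →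
    (∀ (i : Nat) (h : i < q.length), i < p → lexLtB (qkey entry) (qkey q[i]) = false) →
    (∀ (h : p < q.length), lexLtB (qkey entry) (qkey q[p]) = true) →
    insortQ entry q = q.take p ++ entry :: q.drop p := by
  intro q
  induction q with
  | nil =>
      intro p hp _ _
      have : p = 0 := by simpa using hp
      subst this
      simp [insortQ]
  | cons x xs ih =>
      intro p hp h1 h2
      cases p with
      | zero =>
          have hx := h2 (by simp)
          simp only [insortQ, List.getElem_cons_zero] at hx ⊢
          rw [if_pos hx]
          simp
      | succ p' =>
          have hx : lexLtB (qkey entry) (qkey x) = false := by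
            simpa using h1 0 (by simp) (by omega)
          simp only [insortQ]
          rw [if_neg (by simp [hx])]
          rw [List.take_succ_cons, List.drop_succ_cons]
          have hih := ih p' (by simpa using hp)
            (by intro i h hi2; simpa using h1 (i + 1) (by simpa using h) (by omega))
            (by intro h; simpa using h2 (by simpa using h))
          rw [hih]
          simp

-- hence B's binary-search insert is the ordered insert
theorem bsearch_insert_eq_insortQ (entry : Int × Int × List (String × Int))
    (q : List (Int × Int × List (String × Int)))
    (hpw : q.Pairwise (fun a b => lexLtB (qkey a) (qkey b) = true))
    (hne : ∀ f ∈ q, (qkey f).2 ≠ (qkey entry).2) :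
    PySem.List.insert q (bsearchQ q (entry.1, entry.2.1) q.length 0 (q.length : Int)) entry = insortQ entry q := by
  obtain ⟨p, hp, hple, hbelow, habove⟩ :=
    bsearchQ_spec q (entry.1, entry.2.1) hpw q.length 0 (q.length : Int) (by omega)
      (by omega) (by omega) (by omega)
      (by intro i h hi2; omega)
      (by intro i h hi2; omega)
  rw [hp, pyinsert_take_drop q (p : Int) entry (by omega) (by exact_mod_cast hple)]
  have hcast : ((p : Int)).toNat = p := by omega
  rw [hcast]
  refine (insortQ_eq_take_drop entry q p hple ?_ ?_).symm
  · intro i h hi2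
    have := hbelow i h hi2
    have hasym := lexLtB_asym_of this
    simpa [qkey] using hasym
  · intro h
    have hfalse := habove p h (le_refl p)
    have := lexLtB_total_of hfalse (by
      have := hne q[p] (List.getElem_mem h)
      simpa [qkey] using this)
    simpa [qkey] using this

theorem pof_length (totals : List Int) (shards : List (List (String × Int))) :
    (Pof totals shards).length = totals.length := by
  simp [Pof]

theorem pof_getElem (totals : List Int) (shards : List (List (String × Int))) (i : Nat)
    (h : i < totals.length) :
    (Pof totals shards)[i]'(by simpa [pof_length] using h) = (totals.getD i 0, (i : Int), shards.getD i []) := by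
  simp [Pof]

theorem pof_idx_pairwise (totals : List Int) (shards : List (List (String × Int))) :
    (Pof totals shards).Pairwise (fun a b => a.2.1 < b.2.1) := by
  unfold Pof
  rw [List.pairwise_map]
  exact List.pairwise_lt_range.imp (by intro a b h; simpa using h)

theorem pof_idx_nodup (totals : List Int) (shards : List (List (String × Int))) :
    ((Pof totals shards).map (fun e => e.2.1)).Nodup := by
  unfold Pof
  rw [List.map_map]
  have : ((fun e => e.2.1) ∘ fun i : Nat => ((totals.getD i 0, (i : Int), shards.getD i []) : Int × Int × List (String × Int))) = fun i : Nat => (i : Int) := by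
    funext i; rfl
  rw [this]
  exact List.nodup_range.map (fun a b h => by exact_mod_cast h)

theorem pof_set (totals : List Int) (shards : List (List (String × Int))) (i : Nat)
    (t' : Int) (s' : List (String × Int))
    (hi : i < totals.length) (hlen : shards.length = totals.length) :
    Pof (totals.set i t') (shards.set i s') = (Pof totals shards).set i (t', (i : Int), s') := by
  apply List.ext_getElem
  · simp [Pof]
  · intro j h1 h2
    have hj : j < totals.length := by simpa [Pof] using h2
    rw [List.getElem_set]
    by_cases hji : j = i
    · subst hji
      rw [if_pos rfl]
      have := pof_getElem (totals.set j t') (shards.set j s') j (by simpa using hj)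
      rw [this]
      rw [List.getD_eq_getElem _ _ (by simpa using hj), List.getD_eq_getElem _ _ (by rw [List.length_set]; omega)]
      simp
    · rw [if_neg (by omega)]
      have := pof_getElem (totals.set i t') (shards.set i s') j (by simpa using hj)
      rw [this, pof_getElem totals shards j hj]
      rw [List.getD_eq_getElem _ _ (by simpa using hj), List.getD_eq_getElem _ _ (by rw [List.length_set]; omega),
          List.getD_eq_getElem _ _ hj, List.getD_eq_getElem _ _ (by omega)]
      simp [(Ne.symm hji : i ≠ j)]

-- final step: reading the queue back in index order gives A's shards list
theorem finish_eq (n : Int) (shards : List (List (String × Int))) (totals : List Int)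
    (q : List (Int × Int × List (String × Int))) (hInv : InvQ n shards totals q) :
    (PySem.List.sorted q (fun e => e.2.1) false).map (fun e => e.2.2) = shards := by
  obtain ⟨hlt, hls, hperm, _⟩ := hInv
  rw [PySem.List.sorted_eq_of_perm_of_pairwise_lt q (Pof totals shards) (fun e => e.2.1)
      hperm.symm (pof_idx_pairwise totals shards)]
  unfold Pof
  rw [List.map_map]
  have : ((fun e : Int × Int × List (String × Int) => e.2.2) ∘ fun i : Nat => ((totals.getD i 0, (i : Int), shards.getD i []) : Int × Int × List (String × Int))) = fun i : Nat => shards.getD i [] := by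
    funext i; rfl
  rw [this, hlt, ← hls, map_range_getD_self]

theorem go_agree (n : Int) (hn : 1 ≤ n) :
    ∀ (classes : List (String × Int)) (q : List (Int × Int × List (String × Int)))
      (shards : List (List (String × Int))) (totals : List Int),
      InvQ n shards totals q →
      packGoA n classes shards totals =
        (PySem.List.sorted (packGoB classes q) (fun e => e.2.1) false).map (fun e => e.2.2) := by
  intro classes
  induction classes with
  | nil =>
      intro q shards totals hInv
      simpa [packGoA, packGoB] using (finish_eq n shards totals q hInv).symm
  | cons c rest ih =>
      obtain ⟨name, cnt⟩ := c
      intro q shards totals hInv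
      obtain ⟨hlt, hls, hperm, hpw⟩ := hInv
      -- the queue is nonempty
      have hql : q.length = n.toNat := by rw [hperm.length_eq, pof_length, hlt]
      match q, hperm, hpw, hql with
      | [], hperm, hpw, hql => simp at hql; omega
      | e :: qrest, hperm, hpw, hql =>
      -- A's min() returns some index l with the first-minimum property
      have hrne : PySem.List.pyRange 0 n 1 ≠ [] := by
        have := PySem.List.length_pyRange_one 0 n
        intro hc; rw [hc] at this; simp at this; omega
      obtain ⟨l, hmin⟩ : ∃ l, PySem.List.min? (PySem.List.pyRange 0 n 1) (fun i => PySem.List.pyGetD totals i 0) = some l := by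
        cases hm : PySem.List.min? (PySem.List.pyRange 0 n 1) (fun i => PySem.List.pyGetD totals i 0) with
        | none => exact absurd ((PySem.List.min?_eq_none_iff _ _).mp hm) hrne
        | some l => exact ⟨l, rfl⟩
      have hlmem := PySem.List.min?_mem hmin
      have hl0 : 0 ≤ l := ((PySem.List.mem_pyRange_one).mp hlmem).1
      have hln : l < n := ((PySem.List.mem_pyRange_one).mp hlmem).2
      have hkey : ∀ j : Int, 0 ≤ j → PySem.List.pyGetD totals j 0 = totals.getD j.toNat 0 :=
        fun j hj => PySem.List.pyGetD_of_nonneg totals 0 hj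
      -- (b) l's total is minimal
      have hb : ∀ j : Int, 0 ≤ j → j < n → totals.getD l.toNat 0 ≤ totals.getD j.toNat 0 := by
        intro j hj0 hjn
        have := PySem.List.min?_isMin hmin j ((PySem.List.mem_pyRange_one).mpr ⟨hj0, hjn⟩)
        rwa [hkey j hj0, hkey l hl0] at this
      -- (c) every earlier index has a strictly larger total
      have hc : ∀ j : Int, 0 ≤ j → j < l → totals.getD l.toNat 0 < totals.getD j.toNat 0 := by
        intro j hj0 hjl
        obtain ⟨l₁, l₂, hsplit, hbef, _⟩ := min?_first _ _ _ hmin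
        have hjmem : j ∈ PySem.List.pyRange 0 n 1 :=
          (PySem.List.mem_pyRange_one).mpr ⟨hj0, lt_trans hjl hln⟩
        rw [hsplit] at hjmem
        have hpw2 := PySem.List.pairwise_lt_pyRange_one 0 n
        rw [hsplit] at hpw2
        obtain ⟨_, hpw3, _⟩ := List.pairwise_append.mp hpw2
        have hj1 : j ∈ l₁ := by
          rcases List.mem_append.mp hjmem with h | h
          · exact h
          · rcases List.mem_cons.mp h with rfl | h
            · omega
            · have := (List.pairwise_cons.mp hpw3).1 j h; omega
        have := hbef j hj1
        rwa [hkey j hj0, hkey l hl0] at this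
      -- identify the head of B's queue with A's chosen shard
      have hemem : e ∈ Pof totals shards := hperm.subset List.mem_cons_self
      obtain ⟨i0, hi0, hei⟩ : ∃ i0, ∃ _ : i0 < totals.length,
          e = (totals.getD i0 0, (i0 : Int), shards.getD i0 []) := by
        unfold Pof at hemem
        obtain ⟨i0, hi0, heq⟩ := List.mem_map.mp hemem
        exact ⟨i0, List.mem_range.mp hi0, heq.symm⟩
      have hlen_n : totals.length = n.toNat := hlt
      -- every other entry is lexicographically above e
      have hmin_e : ∀ j : Nat, j < totals.length → j ≠ i0 →
          lexLtB (qkey e) (qkey (totals.getD j 0, (j : Int), shards.getD j [])) = true := by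
        intro j hj hji
        have hfm : ((totals.getD j 0, (j : Int), shards.getD j []) : Int × Int × List (String × Int)) ∈ Pof totals shards := by
          unfold Pof
          exact List.mem_map.mpr ⟨j, List.mem_range.mpr hj, rfl⟩
        have hfq := hperm.symm.subset hfm
        have hfe : ((totals.getD j 0, (j : Int), shards.getD j []) : Int × Int × List (String × Int)) ≠ e := by
          intro hc2
          rw [hei] at hc2
          have : (j : Int) = (i0 : Int) := congrArg (fun p => p.2.1) hc2
          exact hji (by exact_mod_cast this)
        have : ((totals.getD j 0, (j : Int), shards.getD j []) : Int × Int × List (String × Int)) ∈ qrest := by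
          rcases List.mem_cons.mp hfq with h | h
          · exact absurd h hfe
          · exact h
        exact (List.pairwise_cons.mp hpw).1 _ this
      -- i0 = l
      have hi0l : i0 = l.toNat := by
        by_contra hne
        have hi0n : (i0 : Int) < n := by omega
        have h1 := hmin_e l.toNat (by omega) (fun h => hne h.symm)
        rw [hei] at h1
        simp only [qkey, lexLtB, Bool.or_eq_true, Bool.and_eq_true, decide_eq_true_eq, beq_iff_eq] at h1
        have hcast : ((i0 : Int)).toNat = i0 := by omega
        have h2 := hb (i0 : Int) (by omega) hi0n
        rw [hcast] at h2
        rcases h1 with h1 | ⟨h1a, h1b⟩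
        · omega
        · have h3 := hc (i0 : Int) (by omega) (by omega)
          rw [hcast] at h3
          omega
      have hlcast : ((l.toNat : Nat) : Int) = l := Int.toNat_of_nonneg hl0
      have hei' : e = (totals.getD l.toNat 0, l, shards.getD l.toNat []) := by
        rw [hei, hi0l, hlcast]
      have hqpw := (List.pairwise_cons.mp hpw).2
      have hneidx : ∀ f ∈ qrest, f.2.1 ≠ l := by
        intro f hf hc2
        have hnodup : ((e :: qrest).map (fun e => e.2.1)).Nodup :=
          (hperm.map (fun e => e.2.1)).nodup_iff.mpr (pof_idx_nodup totals shards)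
        rw [List.map_cons, List.nodup_cons] at hnodup
        obtain ⟨hnot, _⟩ := hnodup
        have he1 : e.2.1 = l := by rw [hei']
        apply hnot
        rw [he1]
        exact List.mem_map.mpr ⟨f, hf, hc2⟩
      -- unfold one step of both programs
      have hstepA : packGoA n ((name, cnt) :: rest) shards totals =
          packGoA n rest (shards.set l.toNat (shards.getD l.toNat [] ++ [(name, cnt)]))
            (totals.set l.toNat (totals.getD l.toNat 0 + cnt)) := by
        simp only [packGoA, hmin]
        rw [PySem.List.pySetD_of_nonneg _ _ hl0, PySem.List.pySetD_of_nonneg _ _ hl0,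
            PySem.List.pyGetD_of_nonneg _ _ hl0, PySem.List.pyGetD_of_nonneg _ _ hl0]
      have hstepB : packGoB ((name, cnt) :: rest) (e :: qrest) =
          packGoB rest (insortQ (totals.getD l.toNat 0 + cnt, l, shards.getD l.toNat [] ++ [(name, cnt)]) qrest) := by
        simp only [packGoB]
        rw [hei']
        congr 1
        exact bsearch_insert_eq_insortQ (totals.getD l.toNat 0 + cnt, l, shards.getD l.toNat [] ++ [(name, cnt)])
          qrest hqpw (by intro f hf; simpa [qkey] using hneidx f hf)
      rw [hstepA, hstepB]
      -- re-establish the invariant for the new states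
      apply ih
      refine ⟨by simpa using hlt, by simpa using hls, ?_, ?_⟩
      · -- permutation
        have hiL : l.toNat < totals.length := by omega
        have hPset := pof_set totals shards l.toNat (totals.getD l.toNat 0 + cnt)
          (shards.getD l.toNat [] ++ [(name, cnt)]) hiL (by omega)
        rw [hPset]
        have hPlen : l.toNat < (Pof totals shards).length := by rw [pof_length]; omega
        have hPi : (Pof totals shards)[l.toNat]'hPlen = e := by
          rw [pof_getElem totals shards l.toNat hiL, hei']
          rw [hlcast]
        -- Pof = take ++ e :: drop
        have hPsplit : Pof totals shards =
            (Pof totals shards).take l.toNat ++ e :: (Pof totals shards).drop (l.toNat + 1) := by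
          conv_lhs => rw [← List.take_append_drop l.toNat (Pof totals shards)]
          rw [List.drop_eq_getElem_cons hPlen, hPi]
        have hqrest : qrest.Perm ((Pof totals shards).take l.toNat ++ (Pof totals shards).drop (l.toNat + 1)) := by
          have hmid : (Pof totals shards).Perm (e :: ((Pof totals shards).take l.toNat ++ (Pof totals shards).drop (l.toNat + 1))) := by
            conv_lhs => rw [hPsplit]
            exact List.perm_middle
          exact (hperm.trans hmid).cons_inv
        have hset : (Pof totals shards).set l.toNat (totals.getD l.toNat 0 + cnt, ((l.toNat : Nat) : Int), shards.getD l.toNat [] ++ [(name, cnt)]) =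
            (Pof totals shards).take l.toNat ++ (totals.getD l.toNat 0 + cnt, ((l.toNat : Nat) : Int), shards.getD l.toNat [] ++ [(name, cnt)]) :: (Pof totals shards).drop (l.toNat + 1) := by
          rw [List.set_eq_take_append_cons_drop]
          rw [if_pos hPlen]
        rw [hset, hlcast]
        refine ((insortQ_perm _ qrest).trans ?_).trans List.perm_middle.symm
        exact hqrest.cons _
      · -- sortedness
        apply insortQ_pairwise
        · exact (List.pairwise_cons.mp hpw).2
        · -- index of the new entry is absent from qrest
          intro f hf hc2
          exact hneidx f hf (by simpa [qkey] using hc2)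

theorem init_inv (n : Int) (hn : 1 ≤ n) :
    InvQ n ((PySem.List.pyRange 0 n 1).map (fun _ => []))
      (List.replicate n.toNat 0)
      ((PySem.List.pyRange 0 n 1).map (fun i => ((0 : Int), i, ([] : List (String × Int))))) := by
  refine ⟨by simp, ?_, ?_, ?_⟩
  · rw [List.length_map, PySem.List.length_pyRange_one]; simp
  · have heq : Pof (List.replicate n.toNat 0) ((PySem.List.pyRange 0 n 1).map (fun _ => [])) =
        (PySem.List.pyRange 0 n 1).map (fun i => ((0 : Int), i, ([] : List (String × Int)))) := by
      unfold Pof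
      rw [List.length_replicate]
      apply List.ext_getElem
      · rw [List.length_map, List.length_range, List.length_map, PySem.List.length_pyRange_one]
        omega
      · intro i h1 h2
        have hi : i < n.toNat := by simpa using h1
        simp only [List.getElem_map, List.getElem_range]
        rw [PySem.List.getElem_pyRange_one]
        have ht : (List.replicate n.toNat (0 : Int)).getD i 0 = 0 := by
          rw [List.getD_eq_getElem _ _ (by simpa using hi)]; simp
        have hs : ((PySem.List.pyRange 0 n 1).map (fun _ => ([] : List (String × Int)))).getD i [] = [] := by
          rw [List.getD_eq_getElem _ _ (by rw [List.length_map, PySem.List.length_pyRange_one]; omega)]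
          simp
        rw [ht, hs]
        simp
    rw [heq]
  · rw [List.pairwise_map]
    refine (PySem.List.pairwise_lt_pyRange_one 0 n).imp ?_
    intro a b h
    simp [qkey, lexLtB]
    omega

theorem nil_case (n : Int) : pack_shards [] n = pack_shards_alt [] n := by
  unfold pack_shards pack_shards_alt
  simp only [packGoA, packGoB]
  rw [PySem.List.sorted_eq_self_of_pairwise]
  · rw [List.map_map]
    congr 1
  · rw [List.pairwise_map]
    exact (PySem.List.pairwise_lt_pyRange_one 0 n).imp (by intro a b h; simp; omega)

-- ===== VERDICT (by name: the statement is the Claim_ definition above) =====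
theorem pack_shards_spec : Claim_equal_pack_shards := by
  intro classes n _dom pre
  unfold Spec_pack_shards
  rcases pre with h | h
  · subst h; exact nil_case n
  · unfold pack_shards pack_shards_alt
    exact go_agree n h classes _ _ _ (init_inv n h)
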